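-- pv_equiv track=rewrite | github.com/sangha25/Cryptocurrency-Data-Analyzer | binance/client.py | _order_params
-- ===== SOURCE A (Python) =====
-- from operator import itemgetter
--
-- def _order_params(data):
--     """Convert params to list with signature as last element
--
--     :param data:
--     :return:
--
--     """
--     has_signature = False
--     params = []
--     for key, value in data.items():
--         if key == 'signature':
--             has_signature = True
--         else:
--             params.append((key, value))
--     # sort parameters by key
--     params.sort(key=itemgetter(0))
--     if has_signature:
--         params.append(('signature', data['signature']))
--     return params
-- ===== SOURCE B (Python) =====
-- def _insert(item, lst):
--     """Insert item into a key-sorted list, keeping it sorted by key."""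
--     for i in range(len(lst)):
--         if item[0] < lst[i][0]:
--             return lst[:i] + [item] + lst[i:]
--     return lst + [item]
--
--
-- def _order_params(data):
--     """Convert params to list with signature as last element
--
--     :param data:
--     :return:
--
--     """
--     out = []
--     sig = None
--     for key, value in data.items():
--         if key == 'signature':
--             sig = value
--         else:
--             out = _insert((key, value), out)
--     if sig is not None:
--         out.append(('signature', sig))
--     return out
-- ===== Notes on version B (the rewrite author's own statement) =====
-- stated objective: alternative
-- what changed: Replaces collect-then-library-sort-then-append with a single streaming pass that maintains the output incrementally via ordered insertion (insertion sort) and captures the signature value as it passes, instead of A's partition loop + list.sort + dict re-lookup.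
import Mathlib
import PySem

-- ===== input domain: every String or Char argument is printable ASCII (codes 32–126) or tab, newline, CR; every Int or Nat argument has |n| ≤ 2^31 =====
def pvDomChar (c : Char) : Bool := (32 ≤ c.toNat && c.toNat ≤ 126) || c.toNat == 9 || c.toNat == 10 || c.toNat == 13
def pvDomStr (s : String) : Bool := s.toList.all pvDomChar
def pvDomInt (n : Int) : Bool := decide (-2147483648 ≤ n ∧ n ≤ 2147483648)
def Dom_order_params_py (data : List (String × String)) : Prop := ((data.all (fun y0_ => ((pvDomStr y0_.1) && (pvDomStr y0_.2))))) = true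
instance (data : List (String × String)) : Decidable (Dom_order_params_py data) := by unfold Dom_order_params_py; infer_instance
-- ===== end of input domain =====

-- B replaces A's partition loop + library sort + dict re-lookup by a single streaming pass that
-- keeps the output key-sorted via ordered insertion (insertion sort) and captures the signature
-- value in passing; alternative algorithm, not faster (O(n^2) vs O(n log n)).

-- ===== PORT A =====
def order_params_py (data : List (String × String)) : List (String × String) :=
  -- has_signature/params loop over data.items()
  let st := data.foldl
    (fun (acc : Bool × List (String × String)) kv =>
      if kv.1 == "signature" then (true, acc.2) else (acc.1, acc.2 ++ [kv]))
    (false, [])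
  -- params.sort(key=itemgetter(0))
  let params := PySem.List.sorted st.2 (fun kv => kv.1)
  if st.1 then
    match PySem.Dict.get? (PySem.Dict.mk data) "signature" with
    | some v => params ++ [("signature", v)]
    | none => params  -- unreachable: has_signature implies the key is found
  else params

-- ===== PORT B =====
-- _insert: scan the key-sorted list, place item before the first strictly greater key
def pvInsert (item : String × String) : List (String × String) → List (String × String)
  | [] => [item]
  | x :: t => if item.1 < x.1 then item :: x :: t else x :: pvInsert item t

def order_params_py_alt (data : List (String × String)) : List (String × String) :=
  let st := data.foldl
    (fun (acc : List (String × String) × Option String) kv =>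
      if kv.1 == "signature" then (acc.1, some kv.2) else (pvInsert kv acc.1, acc.2))
    ([], none)
  st.1 ++ (match st.2 with | some v => [("signature", v)] | none => [])

-- ===== PRECONDITION & SPEC =====
-- Pre_ excludes association lists with a duplicated key: A's parameter is a Python dict, whose
-- keys are necessarily distinct, so such lists do not represent any input A is ever given.
def Pre_order_params_py (data : List (String × String)) : Prop :=
  (data.map Prod.fst).Nodup
instance (data : List (String × String)) : Decidable (Pre_order_params_py data) := by unfold Pre_order_params_py; infer_instance

def pvWitness_order_params_py : (List (String × String)) :=
  [("b", "2"), ("signature", "s"), ("a", "1")]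

def Spec_order_params_py (data : List (String × String)) (out : List (String × String)) : Prop := out = order_params_py_alt data
instance (data : List (String × String)) (out : List (String × String)) : Decidable (Spec_order_params_py data out) := by unfold Spec_order_params_py; infer_instance

-- ===== CLAIM (what is proved, stated in full; the proofs are below) =====
def Claim_equal_order_params_py : Prop := ∀ (data : List (String × String)), Dom_order_params_py data → Pre_order_params_py data → Spec_order_params_py data (order_params_py data)

-- ===== LEMMAS AND PROOFS =====

-- A's loop computes (has_signature, the non-signature items in order)
theorem pv_loopA (l : List (String × String)) (b : Bool) (acc : List (String × String)) :
    l.foldl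
      (fun (acc : Bool × List (String × String)) kv =>
        if kv.1 == "signature" then (true, acc.2) else (acc.1, acc.2 ++ [kv]))
      (b, acc)
    = (b || l.any (fun kv => kv.1 == "signature"),
       acc ++ l.filter (fun kv => !(kv.1 == "signature"))) := by
  induction l generalizing b acc with
  | nil => simp
  | cons x t ih =>
    simp only [List.foldl_cons, List.any_cons, List.filter_cons]
    by_cases hx : x.1 = "signature"
    · rw [if_pos (by simp [hx]), ih]; simp [hx]
    · rw [if_neg (by simp [hx]), ih]
      have hb : (x.1 == "signature") = false := by simp [hx]
      simp [hb]

-- B's loop splits into an insertion fold over the non-signature items and the last signature value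
theorem pv_loopB (l : List (String × String)) (acc : List (String × String)) (s : Option String) :
    l.foldl
      (fun (acc : List (String × String) × Option String) kv =>
        if kv.1 == "signature" then (acc.1, some kv.2) else (pvInsert kv acc.1, acc.2))
      (acc, s)
    = ((l.filter (fun kv => !(kv.1 == "signature"))).foldl (fun a kv => pvInsert kv a) acc,
       (l.filter (fun kv => kv.1 == "signature")).foldl (fun _ kv => some kv.2) s) := by
  induction l generalizing acc s with
  | nil => simp
  | cons x t ih =>
    simp only [List.foldl_cons, List.filter_cons]
    by_cases hx : x.1 = "signature"
    · rw [if_pos (by simp [hx]), ih]; simp [hx]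
    · rw [if_neg (by simp [hx]), ih]
      have hb : (x.1 == "signature") = false := by simp [hx]
      simp [hb]

-- pvInsert is a permutation-insert
theorem pv_insert_perm (a : String × String) (l : List (String × String)) :
    (pvInsert a l).Perm (a :: l) := by
  induction l with
  | nil => simp [pvInsert]
  | cons x t ih =>
    unfold pvInsert
    split_ifs
    · exact List.Perm.refl _
    · exact (ih.cons x).trans (List.Perm.swap a x t)

theorem pv_insert_mem {a b : String × String} {l : List (String × String)}
    (h : b ∈ pvInsert a l) : b = a ∨ b ∈ l := by
  have := (pv_insert_perm a l).mem_iff.mp h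
  simpa using this

-- pvInsert preserves key-sortedness (≤)
theorem pv_insert_sorted (a : String × String) (l : List (String × String))
    (h : l.Pairwise (fun x y => x.1 ≤ y.1)) :
    (pvInsert a l).Pairwise (fun x y => x.1 ≤ y.1) := by
  induction l with
  | nil => simp [pvInsert]
  | cons x t ih =>
    rw [List.pairwise_cons] at h
    unfold pvInsert
    split_ifs with hlt
    · refine List.Pairwise.cons ?_ (List.Pairwise.cons h.1 h.2)
      intro b hb
      rcases List.mem_cons.mp hb with rfl | hb
      · exact le_of_lt hlt
      · exact le_trans (le_of_lt hlt) (h.1 b hb)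
    · refine List.Pairwise.cons ?_ (ih h.2)
      intro b hb
      rcases pv_insert_mem hb with rfl | hb
      · exact not_lt.mp hlt
      · exact h.1 b hb

-- the insertion fold builds a key-sorted permutation of acc ++ l
theorem pv_fold_insert (l acc : List (String × String))
    (h : acc.Pairwise (fun x y => x.1 ≤ y.1)) :
    (l.foldl (fun a kv => pvInsert kv a) acc).Pairwise (fun x y => x.1 ≤ y.1) ∧
    (l.foldl (fun a kv => pvInsert kv a) acc).Perm (acc ++ l) := by
  induction l generalizing acc with
  | nil => simpa using h
  | cons x t ih =>
    simp only [List.foldl_cons]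
    obtain ⟨h1, h2⟩ := ih (pvInsert x acc) (pv_insert_sorted x acc h)
    refine ⟨h1, h2.trans ?_⟩
    have hx1 : (pvInsert x acc ++ t).Perm ((x :: acc) ++ t) := (pv_insert_perm x acc).append_right t
    have hx2 : ((x :: acc) ++ t).Perm (acc ++ x :: t) := by
      simpa using (List.perm_middle (a := x) (l₁ := acc) (l₂ := t)).symm
    exact hx1.trans hx2

-- with nodup keys, the signature entries of data are exactly the looked-up pair
theorem pv_sig_filter (data : List (String × String)) (hnd : (data.map Prod.fst).Nodup)
    (hany : data.any (fun kv => kv.1 == "signature") = true) :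
    ∃ v, data.filter (fun kv => kv.1 == "signature") = [("signature", v)] ∧
      PySem.Dict.get? (PySem.Dict.mk data) "signature" = some v := by
  induction data with
  | nil => simp at hany
  | cons x t ih =>
    simp only [List.map_cons, List.nodup_cons] at hnd
    by_cases hx : x.1 = "signature"
    · refine ⟨x.2, ?_, ?_⟩
      · have ht : t.filter (fun kv => kv.1 == "signature") = [] := by
          rw [List.filter_eq_nil_iff]
          intro kv hkv
          simp only [beq_iff_eq]
          intro hk
          refine hnd.1 ?_
          rw [hx, ← hk]
          exact List.mem_map_of_mem hkv
        rw [List.filter_cons_of_pos (by simp [hx]), ht]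
        simp [Prod.ext_iff, hx]
      · simp [PySem.Dict.get?, hx]
    · have hany' : t.any (fun kv => kv.1 == "signature") = true := by
        simpa [List.any_cons, hx] using hany
      obtain ⟨v, h1, h2⟩ := ih hnd.2 hany'
      refine ⟨v, by simp [hx, h1], ?_⟩
      simpa [PySem.Dict.get?, hx] using h2

-- ===== VERDICT (by name: the statement is the Claim_ definition above) =====
theorem order_params_py_spec : Claim_equal_order_params_py := by
  intro data _ hpre
  unfold Spec_order_params_py order_params_py order_params_py_alt
  rw [pv_loopA, pv_loopB]
  simp only [Bool.false_or, List.nil_append]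
  -- B's ordered-insertion result is a strictly key-sorted permutation of the filtered items
  obtain ⟨hsorted, hperm⟩ :=
    pv_fold_insert (data.filter fun kv => !(kv.1 == "signature")) [] (by simp)
  have hperm' : ((data.filter fun kv => !(kv.1 == "signature")).foldl
      (fun a kv => pvInsert kv a) []).Perm (data.filter fun kv => !(kv.1 == "signature")) := by
    simpa using hperm
  have hndf : ((data.filter fun kv => !(kv.1 == "signature")).map Prod.fst).Nodup :=
    hpre.sublist ((data.filter_sublist).map Prod.fst)
  have hndb := ((hperm'.map Prod.fst).nodup_iff).mpr hndf
  have hstrict : ((data.filter fun kv => !(kv.1 == "signature")).foldl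
      (fun a kv => pvInsert kv a) []).Pairwise (fun a b => a.1 < b.1) :=
    ((hsorted.and (List.pairwise_map.mp hndb)).imp (fun h => lt_of_le_of_ne h.1 h.2))
  -- hence A's library sort of the filtered items equals B's insertion result
  have hsortedeq : PySem.List.sorted (data.filter fun kv => !(kv.1 == "signature"))
      (fun kv => kv.1)
      = (data.filter fun kv => !(kv.1 == "signature")).foldl (fun a kv => pvInsert kv a) [] := by
    apply PySem.List.sorted_eq_of_perm_of_pairwise_lt
    · exact hperm'
    · exact hstrict
  rw [hsortedeq]
  -- the signature tails agree
  by_cases hany : data.any (fun kv => kv.1 == "signature") = true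
  · obtain ⟨v, hfil, hget⟩ := pv_sig_filter data hpre hany
    simp [hany, hget, hfil]
  · have hfil : data.filter (fun kv => kv.1 == "signature") = [] := by
      rw [List.filter_eq_nil_iff]
      intro kv hkv hc
      exact hany (List.any_eq_true.mpr ⟨kv, hkv, hc⟩)
    rw [Bool.not_eq_true] at hany
    simp [hany, hfil]
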